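-- pv_equiv track=rewrite | github.com/alextjanse/Advent-of-Code-2023 | src/1.py | isSpelledNumber
-- ===== SOURCE A (Python) =====
-- def isSpelledNumber(s: str, atStart):
--     digits = {
--         "one": 1,
--         "two": 2,
--         "three": 3,
--         "four": 4,
--         "five": 5,
--         "six": 6,
--         "seven": 7,
--         "eight": 8,
--         "nine": 9
--     }
--
--     for (digit, v) in digits.items():
--         if (atStart and s.startswith(digit)) or (not atStart and s.endswith(digit)): return v
--
--     return None
-- ===== SOURCE B (Python) =====
-- def isSpelledNumber(s: str, atStart):
--     words = ["one", "two", "three", "four", "five", "six", "seven", "eight", "nine"]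
--     # Read the string outward from the relevant end: reverse the words and the
--     # window when matching a suffix, then grow a prefix one character at a time.
--     digits = {(w if atStart else w[::-1]): i + 1 for i, w in enumerate(words)}
--     window = s[:5] if atStart else s[-5:][::-1]
--     acc = ""
--     for ch in window:
--         acc += ch
--         if acc in digits:
--             return digits[acc]
--     return None
-- ===== Notes on version B (the rewrite author's own statement) =====
-- stated objective: alternative
-- what changed: Instead of scanning all nine digit words with startswith/endswith, B orients a five-character window outward from the relevant end (reversing it and the word keys for the suffix case) and grows a prefix one character at a time, looking each prefix up in a dict built by enumerating the word list; correct because no digit word is a prefix of another in this orientation.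
import Mathlib
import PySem

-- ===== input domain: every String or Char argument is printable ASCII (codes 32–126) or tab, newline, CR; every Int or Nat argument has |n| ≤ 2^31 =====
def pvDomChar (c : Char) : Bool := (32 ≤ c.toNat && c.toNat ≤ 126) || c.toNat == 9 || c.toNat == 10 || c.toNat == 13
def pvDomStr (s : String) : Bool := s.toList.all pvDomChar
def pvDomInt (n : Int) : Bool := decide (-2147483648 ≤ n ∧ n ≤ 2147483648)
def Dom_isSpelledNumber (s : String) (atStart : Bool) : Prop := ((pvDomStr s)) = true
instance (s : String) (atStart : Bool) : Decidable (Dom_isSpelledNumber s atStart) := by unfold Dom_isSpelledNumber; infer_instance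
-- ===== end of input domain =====

-- B replaces A's nine-word startswith/endswith scan by orienting a five-character
-- window outward from the relevant end and growing a prefix one character at a
-- time with a dict lookup after each character (alternative; similar cost).

-- ===== PORT A =====
-- the for-loop over digits.items() with early return, as structural recursion
def isSpelledALoop (s : String) (atStart : Bool) : List (String × Int) → Option Int
  | [] => none
  | (digit, v) :: rest =>
    if (atStart && PySem.Str.startswith s digit) || (!atStart && PySem.Str.endswith s digit) then
      some v
    else isSpelledALoop s atStart rest

def isSpelledNumber (s : String) (atStart : Bool) : Option Int :=
  let digits : PySem.Dict String Int := PySem.Dict.ofList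
    [("one", 1), ("two", 2), ("three", 3), ("four", 4), ("five", 5),
     ("six", 6), ("seven", 7), ("eight", 8), ("nine", 9)]
  isSpelledALoop s atStart digits.items

-- ===== PORT B =====
def pvWords : List String := ["one", "two", "three", "four", "five", "six", "seven", "eight", "nine"]

-- w[::-1] on a string; exact per PySem.Str.slice?_none_none_neg_one (step -1 never raises)
def pvRevStr (w : String) : String := String.ofList w.toList.reverse

-- the for-loop over the window's characters, growing acc (ported on the list side)
-- and looking acc up in the dict after each character, as structural recursion
def isSpelledBLoop (digits : PySem.Dict String Int) (acc : List Char) : List Char → Option Int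
  | [] => none
  | ch :: rest =>
    match digits.get? (String.ofList (acc ++ [ch])) with
    | some v => some v
    | none => isSpelledBLoop digits (acc ++ [ch]) rest

def isSpelledNumber_alt (s : String) (atStart : Bool) : Option Int :=
  let digits : PySem.Dict String Int := PySem.Dict.ofList
    ((PySem.List.enumerate pvWords).map
      (fun iw => ((if atStart then iw.2 else pvRevStr iw.2), iw.1 + 1)))
  let window := if atStart then PySem.Str.slice s none (some 5)
                else pvRevStr (PySem.Str.slice s (some (-5)) none)
  isSpelledBLoop digits [] window.toList

-- ===== PRECONDITION & SPEC =====
def Spec_isSpelledNumber (s : String) (atStart : Bool) (out : Option Int) : Prop := out = isSpelledNumber_alt s atStart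
instance (s : String) (atStart : Bool) (out : Option Int) : Decidable (Spec_isSpelledNumber s atStart out) := by unfold Spec_isSpelledNumber; infer_instance

-- ===== CLAIM (what is proved, stated in full; the proofs are below) =====
def Claim_equal_isSpelledNumber : Prop := ∀ (s : String) (atStart : Bool), Dom_isSpelledNumber s atStart → Spec_isSpelledNumber s atStart (isSpelledNumber s atStart)

-- ===== LEMMAS AND PROOFS =====

lemma pv_take_eq_take {l w : List Char} {a b : Nat} (hab : a ≤ b) (h : l.take b = w) :
    l.take a = w.take a := by
  rw [← h, List.take_take, Nat.min_eq_left hab]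

lemma pv_take_ne_of_lt {l : List Char} {a : Nat} (w : List Char) (h : a < w.length) :
    l.take a ≠ w := by
  intro hc
  have := congrArg List.length hc
  simp [List.length_take] at this
  omega

def pvLk (t : List Char) : Option Int :=
  if t = ['o', 'n', 'e'] then some 1
    else if t = ['t', 'w', 'o'] then some 2
    else if t = ['t', 'h', 'r', 'e', 'e'] then some 3
    else if t = ['f', 'o', 'u', 'r'] then some 4
    else if t = ['f', 'i', 'v', 'e'] then some 5
    else if t = ['s', 'i', 'x'] then some 6
    else if t = ['s', 'e', 'v', 'e', 'n'] then some 7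
    else if t = ['e', 'i', 'g', 'h', 't'] then some 8
    else if t = ['n', 'i', 'n', 'e'] then some 9
  else none

def pvLkR (t : List Char) : Option Int :=
  if t = ['e', 'n', 'o'] then some 1
    else if t = ['o', 'w', 't'] then some 2
    else if t = ['e', 'e', 'r', 'h', 't'] then some 3
    else if t = ['r', 'u', 'o', 'f'] then some 4
    else if t = ['e', 'v', 'i', 'f'] then some 5
    else if t = ['x', 'i', 's'] then some 6
    else if t = ['n', 'e', 'v', 'e', 's'] then some 7
    else if t = ['t', 'h', 'g', 'i', 'e'] then some 8
    else if t = ['e', 'n', 'i', 'n'] then some 9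
  else none

lemma pv_get_nil (x : String) : ({ items := [] } : PySem.Dict String Int).get? x = none := rfl

lemma pv_hkey (k c : String) : (k == c) = decide (c.toList = k.toList) := by
  rw [Bool.eq_iff_iff, beq_iff_eq, decide_eq_true_iff, String.toList_inj]; exact eq_comm

lemma pv_tl1 : ("one":String).toList = ['o','n','e'] := by decide
lemma pv_tl2 : ("two":String).toList = ['t','w','o'] := by decide
lemma pv_tl3 : ("three":String).toList = ['t','h','r','e','e'] := by decide
lemma pv_tl4 : ("four":String).toList = ['f','o','u','r'] := by decide
lemma pv_tl5 : ("five":String).toList = ['f','i','v','e'] := by decide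
lemma pv_tl6 : ("six":String).toList = ['s','i','x'] := by decide
lemma pv_tl7 : ("seven":String).toList = ['s','e','v','e','n'] := by decide
lemma pv_tl8 : ("eight":String).toList = ['e','i','g','h','t'] := by decide
lemma pv_tl9 : ("nine":String).toList = ['n','i','n','e'] := by decide
lemma pv_rl1 : ("eno":String).toList = ['e','n','o'] := by decide
lemma pv_rl2 : ("owt":String).toList = ['o','w','t'] := by decide
lemma pv_rl3 : ("eerht":String).toList = ['e','e','r','h','t'] := by decide
lemma pv_rl4 : ("ruof":String).toList = ['r','u','o','f'] := by decide
lemma pv_rl5 : ("evif":String).toList = ['e','v','i','f'] := by decide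
lemma pv_rl6 : ("xis":String).toList = ['x','i','s'] := by decide
lemma pv_rl7 : ("neves":String).toList = ['n','e','v','e','s'] := by decide
lemma pv_rl8 : ("thgie":String).toList = ['t','h','g','i','e'] := by decide
lemma pv_rl9 : ("enin":String).toList = ['e','n','i','n'] := by decide

lemma pv_sw (s w : String) : (PySem.Str.startswith s w : Bool) = decide (s.toList.take w.toList.length = w.toList) := by
  rw [Bool.eq_iff_iff, decide_eq_true_iff,
    show PySem.Str.startswith s w = PySem.Chars.startswith s.toList w.toList from by simp,
    PySem.Chars.startswith_iff, List.prefix_iff_eq_take]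
  exact eq_comm

lemma pv_ew (s w : String) : (PySem.Str.endswith s w : Bool) = decide (s.toList.reverse.take w.toList.length = w.toList.reverse) := by
  rw [Bool.eq_iff_iff, decide_eq_true_iff,
    show PySem.Str.endswith s w = PySem.Chars.endswith s.toList w.toList from by simp,
    PySem.Chars.endswith_iff, ← List.reverse_prefix, List.prefix_iff_eq_take]
  simp [eq_comm]

lemma pv_A_true (s : String) : isSpelledNumber s true =
    (if s.toList.take 3 = ['o', 'n', 'e'] then some 1
     else if s.toList.take 3 = ['t', 'w', 'o'] then some 2
     else if s.toList.take 5 = ['t', 'h', 'r', 'e', 'e'] then some 3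
     else if s.toList.take 4 = ['f', 'o', 'u', 'r'] then some 4
     else if s.toList.take 4 = ['f', 'i', 'v', 'e'] then some 5
     else if s.toList.take 3 = ['s', 'i', 'x'] then some 6
     else if s.toList.take 5 = ['s', 'e', 'v', 'e', 'n'] then some 7
     else if s.toList.take 5 = ['e', 'i', 'g', 'h', 't'] then some 8
     else if s.toList.take 4 = ['n', 'i', 'n', 'e'] then some 9
     else none) := by
  show isSpelledALoop s true [("one", 1), ("two", 2), ("three", 3), ("four", 4), ("five", 5),
     ("six", 6), ("seven", 7), ("eight", 8), ("nine", 9)] = _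
  simp only [isSpelledALoop, Bool.true_and, Bool.not_true, Bool.false_and, Bool.or_false]
  simp only [pv_sw]
  simp only [decide_eq_true_eq, List.length_cons, List.length_nil,
    show ("one":String).toList = ['o', 'n', 'e'] from by decide,
    show ("two":String).toList = ['t', 'w', 'o'] from by decide,
    show ("three":String).toList = ['t', 'h', 'r', 'e', 'e'] from by decide,
    show ("four":String).toList = ['f', 'o', 'u', 'r'] from by decide,
    show ("five":String).toList = ['f', 'i', 'v', 'e'] from by decide,
    show ("six":String).toList = ['s', 'i', 'x'] from by decide,
    show ("seven":String).toList = ['s', 'e', 'v', 'e', 'n'] from by decide,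
    show ("eight":String).toList = ['e', 'i', 'g', 'h', 't'] from by decide,
    show ("nine":String).toList = ['n', 'i', 'n', 'e'] from by decide]

lemma pv_A_false (s : String) : isSpelledNumber s false =
    (if s.toList.reverse.take 3 = ['e', 'n', 'o'] then some 1
     else if s.toList.reverse.take 3 = ['o', 'w', 't'] then some 2
     else if s.toList.reverse.take 5 = ['e', 'e', 'r', 'h', 't'] then some 3
     else if s.toList.reverse.take 4 = ['r', 'u', 'o', 'f'] then some 4
     else if s.toList.reverse.take 4 = ['e', 'v', 'i', 'f'] then some 5
     else if s.toList.reverse.take 3 = ['x', 'i', 's'] then some 6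
     else if s.toList.reverse.take 5 = ['n', 'e', 'v', 'e', 's'] then some 7
     else if s.toList.reverse.take 5 = ['t', 'h', 'g', 'i', 'e'] then some 8
     else if s.toList.reverse.take 4 = ['e', 'n', 'i', 'n'] then some 9
     else none) := by
  show isSpelledALoop s false [("one", 1), ("two", 2), ("three", 3), ("four", 4), ("five", 5),
     ("six", 6), ("seven", 7), ("eight", 8), ("nine", 9)] = _
  simp only [isSpelledALoop, Bool.false_and, Bool.not_false, Bool.true_and, Bool.false_or]
  simp only [pv_ew]
  simp only [decide_eq_true_eq, List.length_cons, List.length_nil,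
    show ("one":String).toList = ['o', 'n', 'e'] from by decide,
    show ("two":String).toList = ['t', 'w', 'o'] from by decide,
    show ("three":String).toList = ['t', 'h', 'r', 'e', 'e'] from by decide,
    show ("four":String).toList = ['f', 'o', 'u', 'r'] from by decide,
    show ("five":String).toList = ['f', 'i', 'v', 'e'] from by decide,
    show ("six":String).toList = ['s', 'i', 'x'] from by decide,
    show ("seven":String).toList = ['s', 'e', 'v', 'e', 'n'] from by decide,
    show ("eight":String).toList = ['e', 'i', 'g', 'h', 't'] from by decide,
    show ("nine":String).toList = ['n', 'i', 'n', 'e'] from by decide,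
    show (['o', 'n', 'e'] : List Char).reverse = ['e', 'n', 'o'] from by decide,
    show (['t', 'w', 'o'] : List Char).reverse = ['o', 'w', 't'] from by decide,
    show (['t', 'h', 'r', 'e', 'e'] : List Char).reverse = ['e', 'e', 'r', 'h', 't'] from by decide,
    show (['f', 'o', 'u', 'r'] : List Char).reverse = ['r', 'u', 'o', 'f'] from by decide,
    show (['f', 'i', 'v', 'e'] : List Char).reverse = ['e', 'v', 'i', 'f'] from by decide,
    show (['s', 'i', 'x'] : List Char).reverse = ['x', 'i', 's'] from by decide,
    show (['s', 'e', 'v', 'e', 'n'] : List Char).reverse = ['n', 'e', 'v', 'e', 's'] from by decide,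
    show (['e', 'i', 'g', 'h', 't'] : List Char).reverse = ['t', 'h', 'g', 'i', 'e'] from by decide,
    show (['n', 'i', 'n', 'e'] : List Char).reverse = ['e', 'n', 'i', 'n'] from by decide]

-- the concrete dicts B builds for atStart = true / false
def pvDictF : PySem.Dict String Int :=
  { items := [("one", 1), ("two", 2), ("three", 3), ("four", 4), ("five", 5),
              ("six", 6), ("seven", 7), ("eight", 8), ("nine", 9)] }

def pvDictR : PySem.Dict String Int :=
  { items := [("eno", 1), ("owt", 2), ("eerht", 3), ("ruof", 4), ("evif", 5),
              ("xis", 6), ("neves", 7), ("thgie", 8), ("enin", 9)] }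

lemma pv_B_loop_F (l : List Char) :
    isSpelledBLoop pvDictF [] (l.take 5) =
    (match pvLk (l.take 3) with
     | some v => some v
     | none => match pvLk (l.take 4) with
               | some v => some v
               | none => match pvLk (l.take 5) with
                         | some v => some v
                         | none => none) := by
  match l with
  | [] => simp [isSpelledBLoop, pvLk]
  | [a] =>
    simp [isSpelledBLoop, pvDictF, PySem.Dict.get?_mk_cons, pv_hkey, pvLk,
      pv_tl1, pv_tl2, pv_tl3, pv_tl4, pv_tl5, pv_tl6, pv_tl7, pv_tl8, pv_tl9, pv_get_nil]
  | [a, b] =>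
    simp [isSpelledBLoop, pvDictF, PySem.Dict.get?_mk_cons, pv_hkey, pvLk,
      pv_tl1, pv_tl2, pv_tl3, pv_tl4, pv_tl5, pv_tl6, pv_tl7, pv_tl8, pv_tl9, pv_get_nil]
  | [a, b, c] =>
    simp [isSpelledBLoop, pvDictF, PySem.Dict.get?_mk_cons, pv_hkey, pvLk,
      pv_tl1, pv_tl2, pv_tl3, pv_tl4, pv_tl5, pv_tl6, pv_tl7, pv_tl8, pv_tl9, pv_get_nil]
    split_ifs <;> rfl
  | [a, b, c, d] =>
    simp [isSpelledBLoop, pvDictF, PySem.Dict.get?_mk_cons, pv_hkey, pvLk,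
      pv_tl1, pv_tl2, pv_tl3, pv_tl4, pv_tl5, pv_tl6, pv_tl7, pv_tl8, pv_tl9, pv_get_nil]
    split_ifs <;> rfl
  | a :: b :: c :: d :: e :: rest =>
    simp [isSpelledBLoop, pvDictF, PySem.Dict.get?_mk_cons, pv_hkey, pvLk,
      pv_tl1, pv_tl2, pv_tl3, pv_tl4, pv_tl5, pv_tl6, pv_tl7, pv_tl8, pv_tl9, pv_get_nil]

lemma pv_B_loop_R (l : List Char) :
    isSpelledBLoop pvDictR [] (l.take 5) =
    (match pvLkR (l.take 3) with
     | some v => some v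
     | none => match pvLkR (l.take 4) with
               | some v => some v
               | none => match pvLkR (l.take 5) with
                         | some v => some v
                         | none => none) := by
  match l with
  | [] => simp [isSpelledBLoop, pvLkR]
  | [a] =>
    simp [isSpelledBLoop, pvDictR, PySem.Dict.get?_mk_cons, pv_hkey, pvLkR,
      pv_rl1, pv_rl2, pv_rl3, pv_rl4, pv_rl5, pv_rl6, pv_rl7, pv_rl8, pv_rl9, pv_get_nil]
  | [a, b] =>
    simp [isSpelledBLoop, pvDictR, PySem.Dict.get?_mk_cons, pv_hkey, pvLkR,
      pv_rl1, pv_rl2, pv_rl3, pv_rl4, pv_rl5, pv_rl6, pv_rl7, pv_rl8, pv_rl9, pv_get_nil]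
  | [a, b, c] =>
    simp [isSpelledBLoop, pvDictR, PySem.Dict.get?_mk_cons, pv_hkey, pvLkR,
      pv_rl1, pv_rl2, pv_rl3, pv_rl4, pv_rl5, pv_rl6, pv_rl7, pv_rl8, pv_rl9, pv_get_nil]
    split_ifs <;> rfl
  | [a, b, c, d] =>
    simp [isSpelledBLoop, pvDictR, PySem.Dict.get?_mk_cons, pv_hkey, pvLkR,
      pv_rl1, pv_rl2, pv_rl3, pv_rl4, pv_rl5, pv_rl6, pv_rl7, pv_rl8, pv_rl9, pv_get_nil]
    split_ifs <;> rfl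
  | a :: b :: c :: d :: e :: rest =>
    simp [isSpelledBLoop, pvDictR, PySem.Dict.get?_mk_cons, pv_hkey, pvLkR,
      pv_rl1, pv_rl2, pv_rl3, pv_rl4, pv_rl5, pv_rl6, pv_rl7, pv_rl8, pv_rl9, pv_get_nil]

lemma pv_B_true (s : String) : isSpelledNumber_alt s true =
    (match pvLk (s.toList.take 3) with
     | some v => some v
     | none => match pvLk (s.toList.take 4) with
               | some v => some v
               | none => match pvLk (s.toList.take 5) with
                         | some v => some v
                         | none => none) := by
  have hw : (PySem.Str.slice s none (some 5)).toList = s.toList.take 5 := by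
    rw [PySem.Str.toList_slice, PySem.Chars.slice_eq_listSlice, PySem.List.slice_to _ (by norm_num)]
    rfl
  have h : isSpelledNumber_alt s true
      = isSpelledBLoop pvDictF [] (PySem.Str.slice s none (some 5)).toList := by
    show isSpelledBLoop (PySem.Dict.ofList
        ((PySem.List.enumerate pvWords).map
          (fun iw => ((if (true : Bool) = true then iw.2 else pvRevStr iw.2), iw.1 + 1)))) [] _ = _
    rw [show (PySem.Dict.ofList
        ((PySem.List.enumerate pvWords).map
          (fun iw => ((if (true : Bool) = true then iw.2 else pvRevStr iw.2), iw.1 + 1))) :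
        PySem.Dict String Int) = pvDictF from by decide]
    rfl
  rw [h, hw]
  exact pv_B_loop_F s.toList

lemma pv_B_false (s : String) : isSpelledNumber_alt s false =
    (match pvLkR (s.toList.reverse.take 3) with
     | some v => some v
     | none => match pvLkR (s.toList.reverse.take 4) with
               | some v => some v
               | none => match pvLkR (s.toList.reverse.take 5) with
                         | some v => some v
                         | none => none) := by
  have hw : (pvRevStr (PySem.Str.slice s (some (-5)) none)).toList = s.toList.reverse.take 5 := by
    have h1 : (PySem.Str.slice s (some (-5)) none).toList = s.toList.drop (s.toList.length - 5) := by
      rw [PySem.Str.toList_slice, PySem.Chars.slice_eq_listSlice,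
        PySem.List.slice_from_neg_ofNat _ 5 (by omega)]
    rw [pvRevStr, String.toList_ofList, h1, List.reverse_drop]
    rcases Nat.le_total 5 s.toList.length with hle | hle
    · congr 1; omega
    · rw [List.take_of_length_le (by rw [List.length_reverse]; omega),
        List.take_of_length_le (by rw [List.length_reverse]; omega)]
  have h : isSpelledNumber_alt s false
      = isSpelledBLoop pvDictR [] (pvRevStr (PySem.Str.slice s (some (-5)) none)).toList := by
    show isSpelledBLoop (PySem.Dict.ofList
        ((PySem.List.enumerate pvWords).map
          (fun iw => ((if (false : Bool) = true then iw.2 else pvRevStr iw.2), iw.1 + 1)))) [] _ = _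
    rw [show (PySem.Dict.ofList
        ((PySem.List.enumerate pvWords).map
          (fun iw => ((if (false : Bool) = true then iw.2 else pvRevStr iw.2), iw.1 + 1))) :
        PySem.Dict String Int) = pvDictR from by decide]
    rfl
  rw [h, hw]
  exact pv_B_loop_R s.toList.reverse

lemma pv_core_start (l : List Char) :
    (if l.take 3 = ['o', 'n', 'e'] then some 1
     else if l.take 3 = ['t', 'w', 'o'] then some 2
     else if l.take 5 = ['t', 'h', 'r', 'e', 'e'] then some 3
     else if l.take 4 = ['f', 'o', 'u', 'r'] then some 4
     else if l.take 4 = ['f', 'i', 'v', 'e'] then some 5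
     else if l.take 3 = ['s', 'i', 'x'] then some 6
     else if l.take 5 = ['s', 'e', 'v', 'e', 'n'] then some 7
     else if l.take 5 = ['e', 'i', 'g', 'h', 't'] then some 8
     else if l.take 4 = ['n', 'i', 'n', 'e'] then some 9
     else none) =
    (match pvLk (l.take 3) with
     | some v => some v
     | none => match pvLk (l.take 4) with
               | some v => some v
               | none => match pvLk (l.take 5) with
                         | some v => some v
                         | none => none) := by
  by_cases h1 : l.take 3 = ['o', 'n', 'e']
  · simp [pvLk, h1]
  by_cases h2 : l.take 3 = ['t', 'w', 'o']
  · simp [pvLk, h1, h2]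
  by_cases h3 : l.take 5 = ['t', 'h', 'r', 'e', 'e']
  · have e3 := pv_take_eq_take (a:=3) (l:=l) (by norm_num) h3
    have e4 := pv_take_eq_take (a:=4) (l:=l) (by norm_num) h3
    simp [pvLk, h1, h2, h3, e3, e4]
  by_cases h4 : l.take 4 = ['f', 'o', 'u', 'r']
  · have e3 := pv_take_eq_take (a:=3) (l:=l) (by norm_num) h4
    simp [pvLk, h1, h2, h3, h4, e3]
  by_cases h5 : l.take 4 = ['f', 'i', 'v', 'e']
  · have e3 := pv_take_eq_take (a:=3) (l:=l) (by norm_num) h5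
    simp [pvLk, h1, h2, h3, h4, h5, e3]
  by_cases h6 : l.take 3 = ['s', 'i', 'x']
  · simp [pvLk, h1, h2, h3, h4, h5, h6]
  by_cases h7 : l.take 5 = ['s', 'e', 'v', 'e', 'n']
  · have e3 := pv_take_eq_take (a:=3) (l:=l) (by norm_num) h7
    have e4 := pv_take_eq_take (a:=4) (l:=l) (by norm_num) h7
    simp [pvLk, h1, h2, h3, h4, h5, h6, h7, e3, e4]
  by_cases h8 : l.take 5 = ['e', 'i', 'g', 'h', 't']
  · have e3 := pv_take_eq_take (a:=3) (l:=l) (by norm_num) h8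
    have e4 := pv_take_eq_take (a:=4) (l:=l) (by norm_num) h8
    simp [pvLk, h1, h2, h3, h4, h5, h6, h7, h8, e3, e4]
  by_cases h9 : l.take 4 = ['n', 'i', 'n', 'e']
  · have e3 := pv_take_eq_take (a:=3) (l:=l) (by norm_num) h9
    simp [pvLk, h1, h2, h3, h4, h5, h6, h7, h8, h9, e3]
  have n33 : l.take 3 ≠ ['t', 'h', 'r', 'e', 'e'] := pv_take_ne_of_lt _ (by norm_num)
  have n34 : l.take 3 ≠ ['f', 'o', 'u', 'r'] := pv_take_ne_of_lt _ (by norm_num)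
  have n35 : l.take 3 ≠ ['f', 'i', 'v', 'e'] := pv_take_ne_of_lt _ (by norm_num)
  have n37 : l.take 3 ≠ ['s', 'e', 'v', 'e', 'n'] := pv_take_ne_of_lt _ (by norm_num)
  have n38 : l.take 3 ≠ ['e', 'i', 'g', 'h', 't'] := pv_take_ne_of_lt _ (by norm_num)
  have n39 : l.take 3 ≠ ['n', 'i', 'n', 'e'] := pv_take_ne_of_lt _ (by norm_num)
  have n43 : l.take 4 ≠ ['t', 'h', 'r', 'e', 'e'] := pv_take_ne_of_lt _ (by norm_num)
  have n47 : l.take 4 ≠ ['s', 'e', 'v', 'e', 'n'] := pv_take_ne_of_lt _ (by norm_num)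
  have n48 : l.take 4 ≠ ['e', 'i', 'g', 'h', 't'] := pv_take_ne_of_lt _ (by norm_num)
  have m41 : l.take 4 ≠ ['o', 'n', 'e'] := fun hc => h1 (by have e := pv_take_eq_take (a:=3) (l:=l) (by norm_num) hc; simpa using e)
  have m42 : l.take 4 ≠ ['t', 'w', 'o'] := fun hc => h2 (by have e := pv_take_eq_take (a:=3) (l:=l) (by norm_num) hc; simpa using e)
  have m46 : l.take 4 ≠ ['s', 'i', 'x'] := fun hc => h6 (by have e := pv_take_eq_take (a:=3) (l:=l) (by norm_num) hc; simpa using e)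
  have m51 : l.take 5 ≠ ['o', 'n', 'e'] := fun hc => h1 (by have e := pv_take_eq_take (a:=3) (l:=l) (by norm_num) hc; simpa using e)
  have m52 : l.take 5 ≠ ['t', 'w', 'o'] := fun hc => h2 (by have e := pv_take_eq_take (a:=3) (l:=l) (by norm_num) hc; simpa using e)
  have m54 : l.take 5 ≠ ['f', 'o', 'u', 'r'] := fun hc => h4 (by have e := pv_take_eq_take (a:=4) (l:=l) (by norm_num) hc; simpa using e)
  have m55 : l.take 5 ≠ ['f', 'i', 'v', 'e'] := fun hc => h5 (by have e := pv_take_eq_take (a:=4) (l:=l) (by norm_num) hc; simpa using e)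
  have m56 : l.take 5 ≠ ['s', 'i', 'x'] := fun hc => h6 (by have e := pv_take_eq_take (a:=3) (l:=l) (by norm_num) hc; simpa using e)
  have m59 : l.take 5 ≠ ['n', 'i', 'n', 'e'] := fun hc => h9 (by have e := pv_take_eq_take (a:=4) (l:=l) (by norm_num) hc; simpa using e)
  simp [pvLk, h1, h2, h3, h4, h5, h6, h7, h8, h9, n33, n34, n35, n37, n38, n39, n43, n47, n48, m41, m42, m46, m51, m52, m54, m55, m56, m59]

lemma pv_core_end (l : List Char) :
    (if l.take 3 = ['e', 'n', 'o'] then some 1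
     else if l.take 3 = ['o', 'w', 't'] then some 2
     else if l.take 5 = ['e', 'e', 'r', 'h', 't'] then some 3
     else if l.take 4 = ['r', 'u', 'o', 'f'] then some 4
     else if l.take 4 = ['e', 'v', 'i', 'f'] then some 5
     else if l.take 3 = ['x', 'i', 's'] then some 6
     else if l.take 5 = ['n', 'e', 'v', 'e', 's'] then some 7
     else if l.take 5 = ['t', 'h', 'g', 'i', 'e'] then some 8
     else if l.take 4 = ['e', 'n', 'i', 'n'] then some 9
     else none) =
    (match pvLkR (l.take 3) with
     | some v => some v
     | none => match pvLkR (l.take 4) with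
               | some v => some v
               | none => match pvLkR (l.take 5) with
                         | some v => some v
                         | none => none) := by
  by_cases h1 : l.take 3 = ['e', 'n', 'o']
  · simp [pvLkR, h1]
  by_cases h2 : l.take 3 = ['o', 'w', 't']
  · simp [pvLkR, h1, h2]
  by_cases h3 : l.take 5 = ['e', 'e', 'r', 'h', 't']
  · have e3 := pv_take_eq_take (a:=3) (l:=l) (by norm_num) h3
    have e4 := pv_take_eq_take (a:=4) (l:=l) (by norm_num) h3
    simp [pvLkR, h1, h2, h3, e3, e4]
  by_cases h4 : l.take 4 = ['r', 'u', 'o', 'f']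
  · have e3 := pv_take_eq_take (a:=3) (l:=l) (by norm_num) h4
    simp [pvLkR, h1, h2, h3, h4, e3]
  by_cases h5 : l.take 4 = ['e', 'v', 'i', 'f']
  · have e3 := pv_take_eq_take (a:=3) (l:=l) (by norm_num) h5
    simp [pvLkR, h1, h2, h3, h4, h5, e3]
  by_cases h6 : l.take 3 = ['x', 'i', 's']
  · simp [pvLkR, h1, h2, h3, h4, h5, h6]
  by_cases h7 : l.take 5 = ['n', 'e', 'v', 'e', 's']
  · have e3 := pv_take_eq_take (a:=3) (l:=l) (by norm_num) h7
    have e4 := pv_take_eq_take (a:=4) (l:=l) (by norm_num) h7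
    simp [pvLkR, h1, h2, h3, h4, h5, h6, h7, e3, e4]
  by_cases h8 : l.take 5 = ['t', 'h', 'g', 'i', 'e']
  · have e3 := pv_take_eq_take (a:=3) (l:=l) (by norm_num) h8
    have e4 := pv_take_eq_take (a:=4) (l:=l) (by norm_num) h8
    simp [pvLkR, h1, h2, h3, h4, h5, h6, h7, h8, e3, e4]
  by_cases h9 : l.take 4 = ['e', 'n', 'i', 'n']
  · have e3 := pv_take_eq_take (a:=3) (l:=l) (by norm_num) h9
    simp [pvLkR, h1, h2, h3, h4, h5, h6, h7, h8, h9, e3]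
  have n33 : l.take 3 ≠ ['e', 'e', 'r', 'h', 't'] := pv_take_ne_of_lt _ (by norm_num)
  have n34 : l.take 3 ≠ ['r', 'u', 'o', 'f'] := pv_take_ne_of_lt _ (by norm_num)
  have n35 : l.take 3 ≠ ['e', 'v', 'i', 'f'] := pv_take_ne_of_lt _ (by norm_num)
  have n37 : l.take 3 ≠ ['n', 'e', 'v', 'e', 's'] := pv_take_ne_of_lt _ (by norm_num)
  have n38 : l.take 3 ≠ ['t', 'h', 'g', 'i', 'e'] := pv_take_ne_of_lt _ (by norm_num)
  have n39 : l.take 3 ≠ ['e', 'n', 'i', 'n'] := pv_take_ne_of_lt _ (by norm_num)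
  have n43 : l.take 4 ≠ ['e', 'e', 'r', 'h', 't'] := pv_take_ne_of_lt _ (by norm_num)
  have n47 : l.take 4 ≠ ['n', 'e', 'v', 'e', 's'] := pv_take_ne_of_lt _ (by norm_num)
  have n48 : l.take 4 ≠ ['t', 'h', 'g', 'i', 'e'] := pv_take_ne_of_lt _ (by norm_num)
  have m41 : l.take 4 ≠ ['e', 'n', 'o'] := fun hc => h1 (by have e := pv_take_eq_take (a:=3) (l:=l) (by norm_num) hc; simpa using e)
  have m42 : l.take 4 ≠ ['o', 'w', 't'] := fun hc => h2 (by have e := pv_take_eq_take (a:=3) (l:=l) (by norm_num) hc; simpa using e)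
  have m46 : l.take 4 ≠ ['x', 'i', 's'] := fun hc => h6 (by have e := pv_take_eq_take (a:=3) (l:=l) (by norm_num) hc; simpa using e)
  have m51 : l.take 5 ≠ ['e', 'n', 'o'] := fun hc => h1 (by have e := pv_take_eq_take (a:=3) (l:=l) (by norm_num) hc; simpa using e)
  have m52 : l.take 5 ≠ ['o', 'w', 't'] := fun hc => h2 (by have e := pv_take_eq_take (a:=3) (l:=l) (by norm_num) hc; simpa using e)
  have m54 : l.take 5 ≠ ['r', 'u', 'o', 'f'] := fun hc => h4 (by have e := pv_take_eq_take (a:=4) (l:=l) (by norm_num) hc; simpa using e)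
  have m55 : l.take 5 ≠ ['e', 'v', 'i', 'f'] := fun hc => h5 (by have e := pv_take_eq_take (a:=4) (l:=l) (by norm_num) hc; simpa using e)
  have m56 : l.take 5 ≠ ['x', 'i', 's'] := fun hc => h6 (by have e := pv_take_eq_take (a:=3) (l:=l) (by norm_num) hc; simpa using e)
  have m59 : l.take 5 ≠ ['e', 'n', 'i', 'n'] := fun hc => h9 (by have e := pv_take_eq_take (a:=4) (l:=l) (by norm_num) hc; simpa using e)
  simp [pvLkR, h1, h2, h3, h4, h5, h6, h7, h8, h9, n33, n34, n35, n37, n38, n39, n43, n47, n48, m41, m42, m46, m51, m52, m54, m55, m56, m59]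

-- ===== VERDICT (by name: the statement is the Claim_ definition above) =====
theorem isSpelledNumber_spec : Claim_equal_isSpelledNumber := by
  intro s atStart _
  unfold Spec_isSpelledNumber
  cases atStart
  · rw [pv_A_false s, pv_B_false s]
    exact pv_core_end s.toList.reverse
  · rw [pv_A_true s, pv_B_true s]
    exact pv_core_start s.toList
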